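-- pv_equiv track=rewrite | github.com/yoonseong00/algo | programmers/레벨1/3진법/sol.py | solution
-- ===== SOURCE A (Python) =====
-- import string
--
-- tmp = string.digits+string.ascii_lowercase
--
-- def convert(num, base) :
--     q, r = divmod(num, base)
--     if q == 0 :
--         return tmp[r]
--     else :
--         return convert(q, base) + tmp[r]
--
-- def solution(n):
--
--     answer = ''
--
--     a = convert(n, 3)
--
--     a_a = list(a)
--
--     while len(a_a) > 0:
--         answer += a_a[-1]
--         a_a.pop()
--
--     return int(answer, 3)
-- ===== SOURCE B (Python) =====
-- def solution(n):
--     def go(n, acc):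
--         if n == 0:
--             return acc
--         return go(n // 3, acc * 3 + n % 3)
--     return go(n, 0)
-- ===== Notes on version B (the rewrite author's own statement) =====
-- stated objective: simpler
-- what changed: Replaces A's recursive int->base-3-string conversion, list-pop reversal and int(s,3) re-parse with a purely arithmetic tail-recursive Horner accumulation over the base-3 digits that never builds a string or list.
import Mathlib
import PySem

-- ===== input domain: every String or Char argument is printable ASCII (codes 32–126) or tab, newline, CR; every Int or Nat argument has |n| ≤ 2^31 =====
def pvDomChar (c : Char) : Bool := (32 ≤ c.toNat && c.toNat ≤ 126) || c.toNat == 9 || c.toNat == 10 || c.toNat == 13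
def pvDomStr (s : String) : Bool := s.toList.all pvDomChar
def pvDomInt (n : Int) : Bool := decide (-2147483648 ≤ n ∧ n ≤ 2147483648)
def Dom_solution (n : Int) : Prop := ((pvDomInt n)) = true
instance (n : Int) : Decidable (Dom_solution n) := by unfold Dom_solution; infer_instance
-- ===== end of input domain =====

-- B replaces A's recursive int→base-3-string conversion, list-pop reversal and int(s,3) re-parse by a
-- purely arithmetic tail-recursive Horner accumulation (objective: simpler — no strings/lists built).
-- Equivalence is about return values on n ≥ 0; both programs raise RecursionError on n < 0.

-- ===== PORT A =====
-- tmp = string.digits + string.ascii_lowercase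
def tmpA : List Char := "0123456789abcdefghijklmnopqrstuvwxyz".toList

-- convert(num, base): q, r = divmod(num, base); if q == 0: return tmp[r] else convert(q, base) + tmp[r]
-- fuel only makes the recursion total: it is never exhausted when 0 ≤ num (the caller passes
-- num.toNat + 1 > number of recursive calls); for num < 0 the Python recurses forever (RecursionError),
-- excluded by Pre_solution, and the port returns none there.
def convertA (fuel : Nat) (num base : Int) : Option (List Char) :=
  match fuel with
  | 0 => none
  | f + 1 =>
    match PySem.Int.divmod? num base with
    | none => none                      -- ZeroDivisionError (unreachable: base is 3)
    | some (q, r) =>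
      match PySem.List.pyGet? tmpA r with
      | none => none                    -- IndexError (unreachable: 0 ≤ r < 3)
      | some ch =>
        if q = 0 then some [ch]
        else (convertA f q base).map (fun s => s ++ [ch])

-- while len(a_a) > 0: answer += a_a[-1]; a_a.pop()
def popLoop (aa answer : List Char) : List Char :=
  if h : 0 < PySem.List.len aa then
    match PySem.List.pyGet? aa (-1) with
    | some c => popLoop aa.dropLast (answer ++ [c])
    | none => answer                    -- unreachable: aa is nonempty
  else answer
termination_by aa.length
decreasing_by
  simp only [PySem.List.len_eq] at h
  simp only [List.length_dropLast]
  omega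

-- int(answer, 3), ported by hand as an MSB-first fold: exact for every string reaching it here —
-- answer is nonempty and consists only of the characters '0', '1', '2' (convert's output reversed),
-- on which Python's int(s, 3) is exactly this fold (no sign/whitespace/underscore/prefix involved).
def parse3 : List Char → Int → Int
  | [], acc => acc
  | c :: rest, acc => parse3 rest (acc * 3 + ((c.toNat : Int) - 48))

def solution (n : Int) : Int :=
  match convertA (n.toNat + 1) n 3 with
  | some a => parse3 (popLoop a []) 0
  | none => 0                           -- unreachable under Pre_solution (A raises for n < 0)

-- ===== PORT B =====
-- def go(n, acc): if n == 0: return acc; return go(n // 3, acc*3 + n % 3)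
-- fuel only makes the recursion total: never exhausted for 0 ≤ n (the caller passes n.toNat + 1);
-- for n < 0 the Python recurses forever (RecursionError), excluded by Pre_solution.
def goB (fuel : Nat) (n acc : Int) : Int :=
  match fuel with
  | 0 => acc
  | f + 1 =>
    if n = 0 then acc
    else goB f (PySem.Int.floordiv n 3) (acc * 3 + PySem.Int.mod n 3)

def solution_alt (n : Int) : Int := goB (n.toNat + 1) n 0

-- ===== PRECONDITION & SPEC =====
-- Pre_ excludes exactly n < 0: there A's convert recurses forever and Python raises RecursionError
-- (B raises RecursionError there too); A returns a value on every n ≥ 0.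
def Pre_solution (n : Int) : Prop := 0 ≤ n
instance (n : Int) : Decidable (Pre_solution n) := by unfold Pre_solution; infer_instance
def pvWitness_solution : Int := 5

def Spec_solution (n : Int) (out : Int) : Prop := out = solution_alt n
instance (n : Int) (out : Int) : Decidable (Spec_solution n out) := by unfold Spec_solution; infer_instance

-- ===== CLAIM (what is proved, stated in full; the proofs are below) =====
def Claim_equal_solution : Prop := ∀ (n : Int), Dom_solution n → Pre_solution n → Spec_solution n (solution n)

-- ===== LEMMAS AND PROOFS =====

theorem divmod?_floordiv (a b : Int) :
    PySem.Int.divmod? a b = if b = 0 then none else some (PySem.Int.floordiv a b, PySem.Int.mod a b) := rfl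

-- the base-3 digits of m, least significant first, as convert produces them (m = 0 gives ['0'])
def rdigits (m : Nat) : List Nat :=
  if m < 3 then [m] else m % 3 :: rdigits (m / 3)
termination_by m
decreasing_by exact Nat.div_lt_self (by omega) (by omega)

def dchar (d : Nat) : Char := if d = 0 then '0' else if d = 1 then '1' else '2'

theorem tmpA_digit (r : Nat) (h : r < 3) : tmpA[r]? = some (dchar r) := by
  interval_cases r <;> decide

theorem dchar_val (d : Nat) (h : d < 3) : ((dchar d).toNat : Int) - 48 = (d : Int) := by
  interval_cases d <;> decide

theorem cast3 : ((3 : Int)) = ((3 : Nat) : Int) := by norm_num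

theorem convertA_eq (fuel m : Nat) (h : m < fuel) :
    convertA fuel (m : Int) 3 = some ((rdigits m).reverse.map dchar) := by
  induction fuel generalizing m with
  | zero => omega
  | succ f ih =>
    rw [convertA, divmod?_floordiv]
    rw [cast3, PySem.Int.floordiv_natCast, PySem.Int.mod_natCast]
    simp only [show ((3 : Nat) : Int) ≠ 0 by norm_num, if_false]
    rw [PySem.List.pyGet?_natCast, tmpA_digit (m % 3) (Nat.mod_lt m (by omega))]
    by_cases h3 : m < 3
    · have hq : m / 3 = 0 := Nat.div_eq_of_lt h3
      rw [hq]
      dsimp only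
      simp only [Nat.cast_zero, if_pos]
      rw [rdigits, if_pos h3]
      have : m % 3 = m := Nat.mod_eq_of_lt h3
      rw [this]
      simp
    · have hq : (((m / 3 : Nat)) : Int) ≠ 0 := by
        have : 0 < m / 3 := Nat.div_pos (by omega) (by omega)
        omega
      dsimp only
      rw [if_neg hq, ← cast3]
      rw [ih (m / 3) (by have := Nat.div_lt_self (show 0 < m by omega) (show 1 < 3 by omega); omega)]
      conv_rhs => rw [rdigits]
      rw [if_neg h3]
      simp

theorem popLoop_eq (aa ans : List Char) : popLoop aa ans = ans ++ aa.reverse := by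
  induction aa using List.reverseRecOn generalizing ans with
  | nil => rw [popLoop]; simp [PySem.List.len_eq]
  | append_singleton ys y ih =>
    rw [popLoop]
    rw [dif_pos (show 0 < PySem.List.len (ys ++ [y]) by simp [PySem.List.len_eq])]
    simp only [PySem.List.pyGet?_neg_one_append_singleton, List.dropLast_concat]
    rw [ih]
    simp

theorem main_horner : ∀ (m : Nat), 0 < m → ∀ (fuel : Nat), m < fuel →
    ∀ acc : Int, parse3 ((rdigits m).map dchar) acc = goB fuel (m : Int) acc := by
  intro m
  induction m using Nat.strong_induction_on with
  | _ m ih =>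
    intro hm fuel hf acc
    obtain ⟨f, rfl⟩ : ∃ f, fuel = f + 1 := ⟨fuel - 1, by omega⟩
    rw [goB]
    rw [if_neg (show (m : Int) ≠ 0 by exact_mod_cast Nat.pos_iff_ne_zero.mp hm)]
    rw [cast3, PySem.Int.floordiv_natCast, PySem.Int.mod_natCast, ← cast3]
    by_cases h3 : m < 3
    · have hq : m / 3 = 0 := Nat.div_eq_of_lt h3
      rw [rdigits, if_pos h3, hq]
      obtain ⟨f', rfl⟩ : ∃ f', f = f' + 1 := ⟨f - 1, by omega⟩
      rw [goB, if_pos (by norm_num)]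
      simp only [List.map_cons, List.map_nil, parse3]
      rw [dchar_val m h3, Nat.mod_eq_of_lt h3]
    · rw [rdigits, if_neg h3]
      simp only [List.map_cons, parse3]
      rw [dchar_val (m % 3) (Nat.mod_lt m (by omega))]
      exact ih (m / 3) (Nat.div_lt_self (by omega) (by omega))
        (Nat.div_pos (by omega) (by omega)) f
        (by have := Nat.div_lt_self (show 0 < m by omega) (show 1 < 3 by omega); omega) _

-- ===== VERDICT (by name: the statement is the Claim_ definition above) =====
theorem solution_spec : Claim_equal_solution := by
  intro n _ hpre
  unfold Spec_solution
  obtain ⟨m, rfl⟩ : ∃ m : Nat, n = (m : Int) := ⟨n.toNat, (Int.toNat_of_nonneg hpre).symm⟩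
  unfold solution solution_alt
  rw [Int.toNat_natCast, convertA_eq (m + 1) m (by omega)]
  dsimp only
  rw [popLoop_eq]
  simp only [List.nil_append, List.map_reverse, List.reverse_reverse]
  rcases Nat.eq_zero_or_pos m with hz | hp
  · subst hz
    rw [rdigits, if_pos (by omega)]
    simp only [List.map_cons, List.map_nil, parse3]
    decide
  · exact main_horner m hp (m + 1) (by omega) 0
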